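-- pv_equiv track=rewrite | github.com/p69180/handygenome | src/handygenome/genomedf/genomedf_methods.py | group_mergetypes
-- ===== SOURCE A (Python) =====
-- MERGETYPES_SIMPLEAGG = ['mean', 'std', 'first', 'last', 'max', 'min', 'median', 'skew']
--
-- MERGETYPES_WEIGHTED_SIMPLEAGG = ['weighted_mean']
--
-- MERGETYPES_BYLENGTH = ['longest', 'shortest']
--
-- def group_mergetypes(merge):
--     mergetype_groups = {
--         'simpleagg': list(),
--         'weighted_simpleagg': list(),
--         'bylength': list(),
--         'custom': list(),
--     }
--     for mergetype in merge:
--         if mergetype in MERGETYPES_SIMPLEAGG: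
--             mergetype_groups['simpleagg'].append(mergetype)
--         elif mergetype in MERGETYPES_WEIGHTED_SIMPLEAGG:
--             mergetype_groups['weighted_simpleagg'].append(mergetype)
--         elif mergetype in MERGETYPES_BYLENGTH:
--             mergetype_groups['bylength'].append(mergetype)
--         else:
--             mergetype_groups['custom'].append(mergetype)
--
--     return mergetype_groups
-- ===== SOURCE B (Python) =====
-- MERGETYPES_SIMPLEAGG = ['mean', 'std', 'first', 'last', 'max', 'min', 'median', 'skew']
-- MERGETYPES_WEIGHTED_SIMPLEAGG = ['weighted_mean']
-- MERGETYPES_BYLENGTH = ['longest', 'shortest']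
--
-- def group_mergetypes(merge):
--     ml = list(merge)
--     return {
--         'simpleagg': [m for m in ml if m in MERGETYPES_SIMPLEAGG],
--         'weighted_simpleagg': [m for m in ml if m in MERGETYPES_WEIGHTED_SIMPLEAGG],
--         'bylength': [m for m in ml if m in MERGETYPES_BYLENGTH],
--         'custom': [m for m in ml
--                    if m not in MERGETYPES_SIMPLEAGG
--                    and m not in MERGETYPES_WEIGHTED_SIMPLEAGG
--                    and m not in MERGETYPES_BYLENGTH],
--     }
-- ===== Notes on version B (the rewrite author's own statement) =====
-- stated objective: simpler
-- what changed: Replaces the single dispatch loop that appends into a mutable four-bucket dict with a dict literal built from four independent list comprehensions (filters) over the materialized input.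
import Mathlib
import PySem

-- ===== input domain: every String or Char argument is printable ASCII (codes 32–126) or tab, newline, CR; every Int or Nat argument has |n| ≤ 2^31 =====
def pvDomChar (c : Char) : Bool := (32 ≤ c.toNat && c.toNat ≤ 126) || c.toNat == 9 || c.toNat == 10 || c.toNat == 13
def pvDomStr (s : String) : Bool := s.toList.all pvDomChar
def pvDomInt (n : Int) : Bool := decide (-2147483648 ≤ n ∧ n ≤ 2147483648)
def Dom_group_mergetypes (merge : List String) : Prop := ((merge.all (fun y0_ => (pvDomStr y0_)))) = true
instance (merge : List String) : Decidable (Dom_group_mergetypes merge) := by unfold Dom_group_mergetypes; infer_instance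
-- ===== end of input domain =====

-- B replaces A's single dispatch loop over a mutable four-bucket dict with four independent
-- membership filters (list comprehensions), one per bucket; same cost, simpler decomposition.

-- ===== PORT A =====
def MERGETYPES_SIMPLEAGG : List String :=
  ["mean", "std", "first", "last", "max", "min", "median", "skew"]
def MERGETYPES_WEIGHTED_SIMPLEAGG : List String := ["weighted_mean"]
def MERGETYPES_BYLENGTH : List String := ["longest", "shortest"]

-- the body of A's for-loop (the if/elif/else dispatch appending into one bucket)
def pvStepA (d : PySem.Dict String (List String)) (mergetype : String) :
    PySem.Dict String (List String) :=
  if MERGETYPES_SIMPLEAGG.contains mergetype then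
    d.modify "simpleagg" [] (· ++ [mergetype])
  else if MERGETYPES_WEIGHTED_SIMPLEAGG.contains mergetype then
    d.modify "weighted_simpleagg" [] (· ++ [mergetype])
  else if MERGETYPES_BYLENGTH.contains mergetype then
    d.modify "bylength" [] (· ++ [mergetype])
  else
    d.modify "custom" [] (· ++ [mergetype])

-- the dict literal with four empty buckets, then the for-loop appending into buckets
def group_mergetypes (merge : List String) : List (String × List String) :=
  let init : PySem.Dict String (List String) :=
    ((((PySem.Dict.empty.insert "simpleagg" []).insert "weighted_simpleagg" []).insert
        "bylength" []).insert "custom" [])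
  (merge.foldl pvStepA init).items

-- ===== PORT B =====
def group_mergetypes_alt (merge : List String) : List (String × List String) :=
  [("simpleagg", merge.filter (fun m => MERGETYPES_SIMPLEAGG.contains m)),
   ("weighted_simpleagg", merge.filter (fun m => MERGETYPES_WEIGHTED_SIMPLEAGG.contains m)),
   ("bylength", merge.filter (fun m => MERGETYPES_BYLENGTH.contains m)),
   ("custom", merge.filter (fun m =>
      !MERGETYPES_SIMPLEAGG.contains m && !MERGETYPES_WEIGHTED_SIMPLEAGG.contains m
        && !MERGETYPES_BYLENGTH.contains m))]

-- ===== PRECONDITION & SPEC =====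
def Spec_group_mergetypes (merge : List String) (out : List (String × List String)) : Prop := out = group_mergetypes_alt merge
instance (merge : List String) (out : List (String × List String)) : Decidable (Spec_group_mergetypes merge out) := by unfold Spec_group_mergetypes; infer_instance

-- ===== CLAIM (what is proved, stated in full; the proofs are below) =====
def Claim_equal_group_mergetypes : Prop := ∀ (merge : List String), Dom_group_mergetypes merge → Spec_group_mergetypes merge (group_mergetypes merge)

-- ===== LEMMAS AND PROOFS =====

-- loop invariant: folding A's step over any four-bucket state appends the corresponding filters
theorem pvStepA_eval (s w b c : List String) (x : String) :
    pvStepA (PySem.Dict.mk [("simpleagg", s), ("weighted_simpleagg", w), ("bylength", b), ("custom", c)]) x =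
    PySem.Dict.mk
      (if x ∈ MERGETYPES_SIMPLEAGG then
        [("simpleagg", s ++ [x]), ("weighted_simpleagg", w), ("bylength", b), ("custom", c)]
      else if x ∈ MERGETYPES_WEIGHTED_SIMPLEAGG then
        [("simpleagg", s), ("weighted_simpleagg", w ++ [x]), ("bylength", b), ("custom", c)]
      else if x ∈ MERGETYPES_BYLENGTH then
        [("simpleagg", s), ("weighted_simpleagg", w), ("bylength", b ++ [x]), ("custom", c)]
      else
        [("simpleagg", s), ("weighted_simpleagg", w), ("bylength", b), ("custom", c ++ [x])]) := by
  by_cases hs : x ∈ MERGETYPES_SIMPLEAGG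
  · simp [pvStepA, PySem.Dict.modify, PySem.Dict.get?, PySem.Dict.getD, PySem.Dict.contains, PySem.Dict.insert, hs]
  · by_cases hw : x ∈ MERGETYPES_WEIGHTED_SIMPLEAGG
    · simp [pvStepA, PySem.Dict.modify, PySem.Dict.get?, PySem.Dict.getD, PySem.Dict.contains, PySem.Dict.insert, hs, hw]
    · by_cases hb : x ∈ MERGETYPES_BYLENGTH
      · simp [pvStepA, PySem.Dict.modify, PySem.Dict.get?, PySem.Dict.getD, PySem.Dict.contains, PySem.Dict.insert, hs, hw, hb]
      · simp [pvStepA, PySem.Dict.modify, PySem.Dict.get?, PySem.Dict.getD, PySem.Dict.contains, PySem.Dict.insert, hs, hw, hb]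

-- loop invariant: folding A's step over any four-bucket state appends the corresponding filters
theorem group_mergetypes_loop (l : List String) (s w b c : List String) :
    (l.foldl pvStepA
      (PySem.Dict.mk [("simpleagg", s), ("weighted_simpleagg", w), ("bylength", b), ("custom", c)])) =
    PySem.Dict.mk
      [("simpleagg", s ++ l.filter (fun m => MERGETYPES_SIMPLEAGG.contains m)),
       ("weighted_simpleagg", w ++ l.filter (fun m => MERGETYPES_WEIGHTED_SIMPLEAGG.contains m)),
       ("bylength", b ++ l.filter (fun m => MERGETYPES_BYLENGTH.contains m)),
       ("custom", c ++ l.filter (fun m =>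
          !MERGETYPES_SIMPLEAGG.contains m && !MERGETYPES_WEIGHTED_SIMPLEAGG.contains m
            && !MERGETYPES_BYLENGTH.contains m))] := by
  induction l generalizing s w b c with
  | nil => simp
  | cons x xs ih =>
    rw [List.foldl_cons, pvStepA_eval]
    by_cases hs : x ∈ MERGETYPES_SIMPLEAGG
    · have hw : x ∉ MERGETYPES_WEIGHTED_SIMPLEAGG := by fin_cases hs <;> decide
      have hb : x ∉ MERGETYPES_BYLENGTH := by fin_cases hs <;> decide
      rw [if_pos hs, ih]
      simp [List.filter_cons, hs, hw, hb]
    · by_cases hw : x ∈ MERGETYPES_WEIGHTED_SIMPLEAGG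
      · have hb : x ∉ MERGETYPES_BYLENGTH := by fin_cases hw <;> decide
        rw [if_neg hs, if_pos hw, ih]
        simp [List.filter_cons, hs, hw, hb]
      · by_cases hb : x ∈ MERGETYPES_BYLENGTH
        · rw [if_neg hs, if_neg hw, if_pos hb, ih]
          simp [List.filter_cons, hs, hw, hb]
        · rw [if_neg hs, if_neg hw, if_neg hb, ih]
          simp [List.filter_cons, hs, hw, hb]

-- ===== VERDICT (by name: the statement is the Claim_ definition above) =====
theorem group_mergetypes_spec : Claim_equal_group_mergetypes := by
  intro merge _
  show group_mergetypes merge = group_mergetypes_alt merge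
  unfold group_mergetypes group_mergetypes_alt
  have hinit : ((((PySem.Dict.empty.insert "simpleagg" ([] : List String)).insert
      "weighted_simpleagg" []).insert "bylength" []).insert "custom" []) =
      PySem.Dict.mk [("simpleagg", []), ("weighted_simpleagg", []), ("bylength", []),
        ("custom", [])] := by decide
  simp only [hinit, group_mergetypes_loop, List.nil_append]
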